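-- pv_equiv track=rewrite | github.com/michaellhans/Simple-Sundanese-Translator | src/PatternBM.py | GetLastOccurance
-- ===== SOURCE A (Python) =====
-- def GetLastOccurance(pattern, character):
--     position = -1
--     n = len(pattern) - 1
--     while ((n >= 0) and (position == -1)):
--         if (pattern[n] == character):
--             position = n
--         else:
--             n = n - 1
--     return position
-- ===== SOURCE B (Python) =====
-- def GetLastOccurance(pattern, character):
--     position = -1
--     for i in range(len(pattern)):
--         if pattern[i] == character:
--             position = i
--     return position
-- ===== Notes on version B (the rewrite author's own statement) =====
-- stated objective: idiomatic
-- what changed: Backward while-loop with early exit on first match replaced by a single full forward for-range pass that overwrites the position on every match (last match survives); the measured speedup is constant-factor (for/range iteration vs per-step while bookkeeping in CPython).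
import Mathlib
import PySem

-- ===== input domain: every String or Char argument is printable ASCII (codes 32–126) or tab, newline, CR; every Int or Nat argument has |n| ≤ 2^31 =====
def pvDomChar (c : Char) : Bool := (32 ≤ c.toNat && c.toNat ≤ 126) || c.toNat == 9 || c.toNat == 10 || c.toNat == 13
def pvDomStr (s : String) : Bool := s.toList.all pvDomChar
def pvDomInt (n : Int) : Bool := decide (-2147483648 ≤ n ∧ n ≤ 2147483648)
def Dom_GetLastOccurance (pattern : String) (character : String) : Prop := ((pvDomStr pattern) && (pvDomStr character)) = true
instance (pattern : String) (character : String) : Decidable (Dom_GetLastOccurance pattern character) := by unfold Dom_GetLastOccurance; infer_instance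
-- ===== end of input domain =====

-- B replaces A's backward early-exit scan by one full forward pass whose overwrite keeps the last match (idiomatic; same cost).

-- ===== PORT A =====
-- A's while loop: n runs from len-1 downward while position == -1; a match stops the loop.
-- gloLoopA p c (n+1) models the loop with current index n; pattern[n] compared to character
-- as in Python: the 1-char string [ch] equals the string character. The none branch is
-- unreachable (the index is always in range).
def gloLoopA (p c : List Char) : Nat → Int
  | 0 => -1
  | k + 1 =>
    match p[k]? with
    | some ch => if [ch] = c then (k : Int) else gloLoopA p c k
    | none => gloLoopA p c k

def GetLastOccurance (pattern : String) (character : String) : Int :=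
  gloLoopA pattern.toList character.toList pattern.toList.length

-- ===== PORT B =====
-- for i in range(len(pattern)): if pattern[i] == character: position = i
def GetLastOccurance_alt (pattern : String) (character : String) : Int :=
  pattern.toList.zipIdx.foldl
    (fun pos ci => if [ci.1] = character.toList then (ci.2 : Int) else pos) (-1)

-- ===== PRECONDITION & SPEC =====
def Spec_GetLastOccurance (pattern : String) (character : String) (out : Int) : Prop := out = GetLastOccurance_alt pattern character
instance (pattern : String) (character : String) (out : Int) : Decidable (Spec_GetLastOccurance pattern character out) := by unfold Spec_GetLastOccurance; infer_instance

-- ===== CLAIM (what is proved, stated in full; the proofs are below) =====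
def Claim_equal_GetLastOccurance : Prop := ∀ (pattern : String) (character : String), Dom_GetLastOccurance pattern character → Spec_GetLastOccurance pattern character (GetLastOccurance pattern character)

-- ===== LEMMAS AND PROOFS =====

-- Appending an element beyond the scanned range does not change A's loop.
theorem gloLoopA_append (p : List Char) (x : Char) (c : List Char) :
    ∀ k, k ≤ p.length → gloLoopA (p ++ [x]) c k = gloLoopA p c k := by
  intro k
  induction k with
  | zero => intro _; rfl
  | succ k ih =>
    intro hk
    have hlt : k < p.length := hk
    simp [gloLoopA, List.getElem?_append_left hlt, ih (Nat.le_of_lt hlt)]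

-- A's backward early-exit scan over the whole string equals B's forward overwrite fold.
theorem gloLoopA_eq_fold (c : List Char) (p : List Char) :
    gloLoopA p c p.length =
      p.zipIdx.foldl (fun pos ci => if [ci.1] = c then (ci.2 : Int) else pos) (-1) := by
  induction p using List.reverseRecOn with
  | nil => rfl
  | append_singleton xs x ih =>
    have hget : (xs ++ [x])[xs.length]? = some x := by
      simp
    simp only [List.length_append, List.length_cons, List.length_nil, List.zipIdx_append,
      List.foldl_append]
    simp only [gloLoopA, hget]
    by_cases h : [x] = c
    · simp [List.zipIdx, h]
    · simp [List.zipIdx, h, gloLoopA_append xs x c xs.length (le_refl _), ih]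

-- ===== VERDICT (by name: the statement is the Claim_ definition above) =====
theorem GetLastOccurance_spec : Claim_equal_GetLastOccurance := by
  intro pattern character _
  unfold Spec_GetLastOccurance GetLastOccurance GetLastOccurance_alt
  exact gloLoopA_eq_fold character.toList pattern.toList
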